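-- pv_equiv track=rewrite | github.com/luchungi/ds3_kernel_testing | utils/transformations.py | timejoined
-- ===== SOURCE A (Python) =====
-- def timejoined(X):
--     '''
--     Returns time-joined transformation of the stream of
--     data X
--
--     Arguments:
--         X: list, whose elements are tuples of the form
--         (time, value).
--
--     Returns:
--         list of points on the plane, the time-joined
--         transformed stream of X
--     '''
--     X.append(X[-1])
--     l=[]
--
--     for j in range(2*(len(X))+1+2):
--             if j==0:
--                     l.append((X[j][0], 0))
--                     continue
--             for i in range(len(X)-1):
--                     if j==2*i+1:
--                             l.append((X[i][0], X[i][1]))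
--                             break
--                     if j==2*i+2:
--                             l.append((X[i+1][0], X[i][1]))
--                             break
--     return l
-- ===== SOURCE B (Python) =====
-- def timejoined(X):
--     l = [(X[0][0], 0)]
--     for (a, b), (c, _) in zip(X, X[1:]):
--         l.append((a, b))
--         l.append((c, b))
--     t, v = X[-1]
--     l.append((t, v))
--     l.append((t, v))
--     return l
-- ===== Notes on version B (the rewrite author's own statement) =====
-- stated objective: faster
-- what changed: B walks consecutive pairs of X once (zip) instead of A's outer loop over 2n+5 indices with an inner linear search for the matching index; A also mutates X in place (appends a duplicate last element) while B does not (return values are identical).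
import Mathlib
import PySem

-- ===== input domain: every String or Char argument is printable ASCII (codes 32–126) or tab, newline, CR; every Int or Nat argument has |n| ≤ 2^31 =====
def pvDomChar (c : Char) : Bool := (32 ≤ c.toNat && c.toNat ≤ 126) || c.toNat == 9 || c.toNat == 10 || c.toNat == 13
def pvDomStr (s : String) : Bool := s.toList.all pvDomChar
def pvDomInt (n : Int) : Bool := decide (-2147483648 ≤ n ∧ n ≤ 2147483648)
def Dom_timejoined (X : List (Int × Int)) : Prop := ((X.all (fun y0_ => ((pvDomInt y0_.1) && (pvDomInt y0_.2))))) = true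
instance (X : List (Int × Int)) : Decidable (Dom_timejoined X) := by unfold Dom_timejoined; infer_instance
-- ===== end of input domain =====

-- B is a single pass over consecutive pairs (O(n)) replacing A's index search (O(n^2)).
-- A mutates its argument (X.append(X[-1])); the equivalence proved here is about the RETURN value only.

-- ===== PORT A =====
-- the inner 'for i in range(len(X)-1): … break' search: returns the first hit, none if no index matches
def tjInner (X' : List (Int × Int)) (j : Int) : List Int → Option (Int × Int)
  | [] => none
  | i :: rest =>
    if j = 2*i + 1 then some (PySem.List.pyGetD X' i (0, 0))
    else if j = 2*i + 2 then
      some ((PySem.List.pyGetD X' (i+1) (0, 0)).1, (PySem.List.pyGetD X' i (0, 0)).2)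
    else tjInner X' j rest

def timejoined (X : List (Int × Int)) : List (Int × Int) :=
  -- X.append(X[-1]); Python raises IndexError on empty X (excluded by Pre_); default never read
  let X' := X ++ [PySem.List.pyGetD X (-1) (0, 0)]
  (PySem.List.pyRange 0 (2*(X'.length : Int) + 1 + 2) 1).foldl
    (fun l j =>
      if j = 0 then l ++ [((PySem.List.pyGetD X' j (0, 0)).1, 0)]
      else match tjInner X' j (PySem.List.pyRange 0 ((X'.length : Int) - 1) 1) with
        | some p => l ++ [p]
        | none => l) []

-- ===== PORT B =====
def timejoined_alt (X : List (Int × Int)) : List (Int × Int) :=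
  -- X[0] / X[-1] raise on empty X (excluded by Pre_); defaults never read
  let l := [((PySem.List.pyGetD X 0 (0, 0)).1, 0)]
  let l := (X.zip (X.drop 1)).foldl
    (fun l pq => l ++ [(pq.1.1, pq.1.2), (pq.2.1, pq.1.2)]) l
  let t := PySem.List.pyGetD X (-1) (0, 0)
  l ++ [(t.1, t.2), (t.1, t.2)]

-- ===== PRECONDITION & SPEC =====
-- Pre_ excludes only the empty list, on which Python A (X[-1]) raises IndexError.
def Pre_timejoined (X : List (Int × Int)) : Prop := X ≠ []
instance (X : List (Int × Int)) : Decidable (Pre_timejoined X) := by unfold Pre_timejoined; infer_instance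
def pvWitness_timejoined : (List (Int × Int)) := [(1, 2), (3, 4)]
def Spec_timejoined (X : List (Int × Int)) (out : List (Int × Int)) : Prop := out = timejoined_alt X
instance (X : List (Int × Int)) (out : List (Int × Int)) : Decidable (Spec_timejoined X out) := by unfold Spec_timejoined; infer_instance

-- ===== CLAIM (what is proved, stated in full; the proofs are below) =====
def Claim_equal_timejoined : Prop := ∀ (X : List (Int × Int)), Dom_timejoined X → Pre_timejoined X → Spec_timejoined X (timejoined X)

-- ===== LEMMAS AND PROOFS =====
-- the flattened "plane polyline" over consecutive pairs of a list
def pairsFlat : List (Int × Int) → List (Int × Int)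
  | [] => []
  | [_] => []
  | p :: q :: rest => (p.1, p.2) :: (q.1, p.2) :: pairsFlat (q :: rest)

theorem tjInner_odd (X' : List (Int × Int)) (i a b : Int) (ha : a ≤ i) (hb : i < b) :
    tjInner X' (2*i + 1) (PySem.List.pyRange a b 1) = some (PySem.List.pyGetD X' i (0, 0)) := by
  obtain ⟨k, hk⟩ : ∃ k : ℕ, b - a = (k : Int) := ⟨(b - a).toNat, by omega⟩
  induction k generalizing a with
  | zero => omega
  | succ n ih =>
    rw [PySem.List.pyRange_one_cons (by omega)]
    by_cases hi : i = a
    · subst hi; simp [tjInner]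
    · have h1 : ¬ (2*i + 1 = 2*a + 1) := by omega
      have h2 : ¬ (2*i + 1 = 2*a + 2) := by omega
      simp only [tjInner, if_neg h1, if_neg h2]
      exact ih (a+1) (by omega) (by omega)

theorem tjInner_even (X' : List (Int × Int)) (i a b : Int) (ha : a ≤ i) (hb : i < b) :
    tjInner X' (2*i + 2) (PySem.List.pyRange a b 1) =
      some ((PySem.List.pyGetD X' (i+1) (0, 0)).1, (PySem.List.pyGetD X' i (0, 0)).2) := by
  obtain ⟨k, hk⟩ : ∃ k : ℕ, b - a = (k : Int) := ⟨(b - a).toNat, by omega⟩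
  induction k generalizing a with
  | zero => omega
  | succ n ih =>
    rw [PySem.List.pyRange_one_cons (by omega)]
    by_cases hi : i = a
    · subst hi
      have h1 : ¬ (2*i + 2 = 2*i + 1) := by omega
      simp [tjInner]
    · have h1 : ¬ (2*i + 2 = 2*a + 1) := by omega
      have h2 : ¬ (2*i + 2 = 2*a + 2) := by omega
      simp only [tjInner, if_neg h1, if_neg h2]
      exact ih (a+1) (by omega) (by omega)

theorem tjInner_none (X' : List (Int × Int)) (j a b : Int) (hj : 2*b < j) (ha : 0 ≤ a) :
    tjInner X' j (PySem.List.pyRange a b 1) = none := by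
  obtain ⟨k, hk⟩ : ∃ k : ℕ, max 0 (b - a) = (k : Int) := ⟨(max 0 (b - a)).toNat, by omega⟩
  induction k generalizing a with
  | zero => rw [PySem.List.pyRange_one_eq_nil (by omega)]; rfl
  | succ n ih =>
    rw [PySem.List.pyRange_one_cons (by omega)]
    have h1 : ¬ (j = 2*a + 1) := by omega
    have h2 : ¬ (j = 2*a + 2) := by omega
    simp only [tjInner, if_neg h1, if_neg h2]
    exact ih (a+1) (by omega) (by omega)

-- A's outer-loop body as an append of a per-index chunk
def tjG (X' : List (Int × Int)) (j : Int) : List (Int × Int) :=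
  if j = 0 then [((PySem.List.pyGetD X' j (0, 0)).1, 0)]
  else (tjInner X' j (PySem.List.pyRange 0 ((X'.length : Int) - 1) 1)).toList

-- B's per-consecutive-pair chunk
def tjF (pq : (Int × Int) × (Int × Int)) : List (Int × Int) := [(pq.1.1, pq.1.2), (pq.2.1, pq.1.2)]

-- per-index chunk over a list, index form
def tjH (Y : List (Int × Int)) (i : Int) : List (Int × Int) :=
  [PySem.List.pyGetD Y i (0, 0), ((PySem.List.pyGetD Y (i+1) (0, 0)).1, (PySem.List.pyGetD Y i (0, 0)).2)]

theorem timejoined_eq_flatMap (X : List (Int × Int)) :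
    timejoined X = (PySem.List.pyRange 0 (2*(((X ++ [PySem.List.pyGetD X (-1) (0, 0)]).length : Int)) + 1 + 2) 1).flatMap
      (tjG (X ++ [PySem.List.pyGetD X (-1) (0, 0)])) := by
  unfold timejoined
  dsimp only
  have hbody : (fun (l : List (Int × Int)) (j : Int) =>
      if j = 0 then l ++ [((PySem.List.pyGetD (X ++ [PySem.List.pyGetD X (-1) (0, 0)]) j (0, 0)).1, 0)]
      else match tjInner (X ++ [PySem.List.pyGetD X (-1) (0, 0)]) j
              (PySem.List.pyRange 0 (((X ++ [PySem.List.pyGetD X (-1) (0, 0)]).length : Int) - 1) 1) with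
        | some p => l ++ [p]
        | none => l) = (fun l j => l ++ tjG (X ++ [PySem.List.pyGetD X (-1) (0, 0)]) j) := by
    funext l j
    by_cases hj : j = 0
    · simp [tjG, hj]
    · simp only [tjG, if_neg hj]
      cases tjInner (X ++ [PySem.List.pyGetD X (-1) (0, 0)]) j
        (PySem.List.pyRange 0 (((X ++ [PySem.List.pyGetD X (-1) (0, 0)]).length : Int) - 1) 1) <;> simp
  rw [hbody, PySem.List.foldl_append_eq_flatMap]
  simp

theorem tjTail (X' : List (Int × Int)) (a b : Int) (ha : 2*((X'.length : Int) - 1) < a) (ha0 : 0 < a) :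
    (PySem.List.pyRange a b 1).flatMap (tjG X') = [] := by
  obtain ⟨k, hk⟩ : ∃ k : ℕ, max 0 (b - a) = (k : Int) := ⟨(max 0 (b - a)).toNat, by omega⟩
  induction k generalizing a with
  | zero => rw [PySem.List.pyRange_one_eq_nil (by omega)]; rfl
  | succ n ih =>
    rw [PySem.List.pyRange_one_cons (by omega)]
    rw [List.flatMap_cons]
    rw [show tjG X' a = [] from ?_, List.nil_append]
    · exact ih (a+1) (by omega) (by omega) (by omega)
    · simp only [tjG, if_neg (by omega : ¬ a = 0)]
      rw [tjInner_none X' a 0 ((X'.length : Int) - 1) (by omega) le_rfl]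
      rfl

theorem tjMiddle (X' : List (Int × Int)) (m i : Int) (hm : m = (X'.length : Int) - 1)
    (h0 : 0 ≤ i) (him : i ≤ m) :
    (PySem.List.pyRange (2*i+1) (2*m+1) 1).flatMap (tjG X') =
      (PySem.List.pyRange i m 1).flatMap (tjH X') := by
  obtain ⟨k, hk⟩ : ∃ k : ℕ, m - i = (k : Int) := ⟨(m - i).toNat, by omega⟩
  induction k generalizing i with
  | zero =>
    rw [PySem.List.pyRange_one_eq_nil (by omega), PySem.List.pyRange_one_eq_nil (by omega)]
    rfl
  | succ n ih =>
    rw [PySem.List.pyRange_one_cons (by omega : (2*i+1 : Int) < 2*m+1),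
        PySem.List.pyRange_one_cons (by omega : (2*i+1+1 : Int) < 2*m+1),
        PySem.List.pyRange_one_cons (by omega : i < m)]
    rw [List.flatMap_cons, List.flatMap_cons, List.flatMap_cons]
    have hodd : tjG X' (2*i+1) = [PySem.List.pyGetD X' i (0, 0)] := by
      simp only [tjG, if_neg (by omega : ¬ (2*i+1 : Int) = 0), ← hm]
      rw [tjInner_odd X' i 0 m h0 (by omega)]
      rfl
    have heven : tjG X' (2*i+1+1) = [((PySem.List.pyGetD X' (i+1) (0, 0)).1, (PySem.List.pyGetD X' i (0, 0)).2)] := by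
      simp only [tjG, if_neg (by omega : ¬ (2*i+1+1 : Int) = 0), ← hm]
      rw [show (2*i+1+1 : Int) = 2*i+2 by ring, tjInner_even X' i 0 m h0 (by omega)]
      rfl
    rw [hodd, heven, show (2*i+1+1+1 : Int) = 2*(i+1)+1 by ring,
        ih (i+1) (by omega) (by omega) (by omega)]
    simp [tjH]

theorem pyGetD_cons_succ (y : Int × Int) (tl : List (Int × Int)) (i : Int) (h : 0 ≤ i) :
    PySem.List.pyGetD (y :: tl) (i+1) (0, 0) = PySem.List.pyGetD tl i (0, 0) := by
  obtain ⟨k, hk⟩ : ∃ k : ℕ, i = (k : Int) := ⟨i.toNat, by omega⟩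
  subst hk
  rw [show ((k : Int) + 1) = ((k+1 : ℕ) : Int) by push_cast; ring]
  rw [PySem.List.pyGetD_natCast, PySem.List.pyGetD_natCast]
  rfl

theorem tjShift (y : Int × Int) (tl : List (Int × Int)) (a b : Int) (ha : 0 ≤ a) :
    (PySem.List.pyRange (a+1) (b+1) 1).flatMap (tjH (y :: tl)) =
      (PySem.List.pyRange a b 1).flatMap (tjH tl) := by
  obtain ⟨k, hk⟩ : ∃ k : ℕ, max 0 (b - a) = (k : Int) := ⟨(max 0 (b - a)).toNat, by omega⟩
  induction k generalizing a with
  | zero =>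
    rw [PySem.List.pyRange_one_eq_nil (by omega), PySem.List.pyRange_one_eq_nil (by omega)]
    rfl
  | succ n ih =>
    rw [PySem.List.pyRange_one_cons (by omega : a + 1 < b + 1), PySem.List.pyRange_one_cons (by omega : a < b)]
    rw [List.flatMap_cons, List.flatMap_cons]
    have hchunk : tjH (y :: tl) (a+1) = tjH tl a := by
      simp only [tjH]
      rw [pyGetD_cons_succ y tl a ha, show (a+1+1 : Int) = (a+1)+1 by ring,
          pyGetD_cons_succ y tl (a+1) (by omega)]
    rw [hchunk, ih (a+1) (by omega) (by omega)]

theorem tjIndexed (Y : List (Int × Int)) (hY : Y ≠ []) :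
    (PySem.List.pyRange 0 ((Y.length : Int) - 1) 1).flatMap (tjH Y) = pairsFlat Y := by
  induction Y with
  | nil => exact absurd rfl hY
  | cons y tl ih =>
    cases tl with
    | nil =>
      have h1 : ((([y] : List (Int × Int)).length : Int) - 1) = 0 := by simp
      rw [h1, PySem.List.pyRange_one_eq_nil le_rfl]
      rfl
    | cons z rest =>
      have hlen : (((y :: z :: rest).length : Int) - 1) = ((z :: rest).length : Int) := by
        simp
      rw [hlen, PySem.List.pyRange_one_cons (by exact_mod_cast rest.length.succ_pos), List.flatMap_cons]
      have h0 : tjH (y :: z :: rest) 0 = [(y.1, y.2), (z.1, y.2)] := by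
        simp only [tjH, PySem.List.pyGetD_zero_cons, zero_add]
        rw [show (1 : Int) = ((1 : ℕ) : Int) by norm_num, PySem.List.pyGetD_natCast]
        rfl
      have hshift := tjShift y (z :: rest) 0 (((z :: rest).length : Int) - 1) le_rfl
      rw [sub_add_cancel] at hshift
      rw [h0, hshift, ih (by simp)]
      rfl

theorem tjPairs (xs : List (Int × Int)) : ∀ (x t : Int × Int),
    t = (x :: xs).getLast (List.cons_ne_nil x xs) →
    pairsFlat (x :: (xs ++ [t])) = ((x :: xs).zip xs).flatMap tjF ++ [(t.1, t.2), (t.1, t.2)] := by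
  induction xs with
  | nil =>
    intro x t ht
    simp only [List.getLast_singleton] at ht
    subst ht
    rfl
  | cons q rest ih =>
    intro x t ht
    rw [List.getLast_cons (List.cons_ne_nil q rest)] at ht
    have := ih q t ht
    simp only [List.cons_append, pairsFlat] at this ⊢
    rw [this]
    rfl

theorem tjMiddle0 (X' : List (Int × Int)) (m : Int) (hm : m = (X'.length : Int) - 1) (h0m : 0 ≤ m) :
    (PySem.List.pyRange 1 (2*m+1) 1).flatMap (tjG X') =
      (PySem.List.pyRange 0 m 1).flatMap (tjH X') := by
  have h := tjMiddle X' m 0 hm le_rfl h0m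
  norm_num at h
  exact h

-- ===== VERDICT (by name: the statement is the Claim_ definition above) =====
theorem timejoined_spec : Claim_equal_timejoined := by
  intro X _hDom hPre
  unfold Spec_timejoined
  cases X with
  | nil => exact absurd rfl hPre
  | cons x xs =>
    set t := PySem.List.pyGetD (x :: xs) (-1) (0, 0) with ht
    have htLast : t = (x :: xs).getLast (List.cons_ne_nil x xs) :=
      PySem.List.pyGetD_neg_one (x :: xs) (0, 0) (List.cons_ne_nil x xs)
    set n : Int := ((x :: xs).length : Int) with hn
    have hn1 : 1 ≤ n := by rw [hn]; exact_mod_cast xs.length.succ_pos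
    set L : List (Int × Int) := x :: (xs ++ [t]) with hL
    have hL1 : (L.length : Int) - 1 = n := by
      rw [hL, hn]
      simp only [List.length_cons, List.length_append, List.length_nil]
      push_cast
      ring
    -- A side
    rw [timejoined_eq_flatMap, ← ht]
    simp only [List.cons_append]
    rw [← hL]
    have hBL : (L.length : Int) = n + 1 := by omega
    have hs1 : PySem.List.pyRange 0 (2*((L.length : Int)) + 1 + 2) 1 =
        PySem.List.pyRange 0 (2*n+1) 1 ++ PySem.List.pyRange (2*n+1) (2*((L.length : Int)) + 1 + 2) 1 :=
      PySem.List.pyRange_one_append 0 (2*n+1) _ (by omega) (by omega)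
    have hs2 : PySem.List.pyRange 0 (2*n+1) 1 = PySem.List.pyRange 0 1 1 ++ PySem.List.pyRange 1 (2*n+1) 1 :=
      PySem.List.pyRange_one_append 0 1 (2*n+1) (by omega) (by omega)
    rw [hs1, hs2, List.flatMap_append, List.flatMap_append]
    have h01 : PySem.List.pyRange 0 1 1 = [0] := by decide
    have hfirst : List.flatMap (tjG L) [0] = [(x.1, 0)] := by
      simp [tjG, hL, PySem.List.pyGetD_zero_cons]
    rw [h01, hfirst, tjMiddle0 L n hL1.symm (by omega),
        tjTail L (2*n+1) _ (by omega) (by omega),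
        show PySem.List.pyRange 0 n 1 = PySem.List.pyRange 0 ((L.length : Int) - 1) 1 from by rw [hL1],
        tjIndexed L (by simp [hL])]
    -- B side
    unfold timejoined_alt
    dsimp only
    rw [PySem.List.foldl_append_eq_flatMap, ← ht, PySem.List.pyGetD_zero_cons]
    rw [hL, tjPairs xs x t htLast]
    simp
    rfl
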